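-- pv_equiv track=rewrite | github.com/pengthao/py-proj-3 | practice.py | equalsZero
-- ===== SOURCE A (Python) =====
-- def equalsZero(lis):
--     numbers = set()
--
--     for num in lis:
--         inv = -num
--         if inv in numbers:
--             return True
--         numbers.add(num)
--     return False
-- ===== SOURCE B (Python) =====
-- def equalsZero(lis):
--     s = set(lis)
--     if any(x != 0 and -x in s for x in s):
--         return True
--     return lis.count(0) >= 2
-- ===== Notes on version B (the rewrite author's own statement) =====
-- stated objective: simpler
-- what changed: A grows a seen-set incrementally and early-returns on the first element whose negation was already seen; B builds the full set once, scans it for a nonzero element whose negation is also present, and handles the self-negating zero case by an explicit count(0) >= 2 check.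
import Mathlib
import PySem

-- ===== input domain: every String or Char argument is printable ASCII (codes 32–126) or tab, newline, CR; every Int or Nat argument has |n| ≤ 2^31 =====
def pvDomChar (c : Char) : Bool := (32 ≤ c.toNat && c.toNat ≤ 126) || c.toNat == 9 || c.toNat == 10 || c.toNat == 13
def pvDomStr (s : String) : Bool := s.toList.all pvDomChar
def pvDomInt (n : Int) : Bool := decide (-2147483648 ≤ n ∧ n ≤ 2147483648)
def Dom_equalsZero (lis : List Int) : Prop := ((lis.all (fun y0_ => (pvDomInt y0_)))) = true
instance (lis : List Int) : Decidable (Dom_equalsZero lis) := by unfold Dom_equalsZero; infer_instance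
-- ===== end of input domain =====

-- B replaces A's incremental grow-and-early-return pass by building the full set once,
-- then scanning it for a nonzero element whose negation is present, with a separate
-- count(0) >= 2 check for the self-negating zero case (objective: simpler).

-- ===== PORT A =====
-- the 'for num in lis' loop with the growing 'numbers' set and early return
def eqzLoop (numbers : PySem.Set Int) (l : List Int) : Bool :=
  match l with
  | [] => false
  | num :: rest =>
    if PySem.Set.contains numbers (-num) then true
    else eqzLoop (PySem.Set.add numbers num) rest

def equalsZero (lis : List Int) : Bool := eqzLoop PySem.Set.empty lis

-- ===== PORT B =====
def equalsZero_alt (lis : List Int) : Bool :=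
  let s : PySem.Set Int := PySem.Set.ofList lis
  if s.any (fun x => x != 0 && PySem.Set.contains s (-x)) then true
  else decide (2 ≤ PySem.List.count lis 0)

-- ===== PRECONDITION & SPEC =====
def Spec_equalsZero (lis : List Int) (out : Bool) : Prop := out = equalsZero_alt lis
instance (lis : List Int) (out : Bool) : Decidable (Spec_equalsZero lis out) := by unfold Spec_equalsZero; infer_instance

-- ===== CLAIM (what is proved, stated in full; the proofs are below) =====
def Claim_equal_equalsZero : Prop := ∀ (lis : List Int), Dom_equalsZero lis → Spec_equalsZero lis (equalsZero lis)

-- ===== LEMMAS AND PROOFS =====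

-- the mathematical content shared by both programs
def EqzProp (l : List Int) : Prop :=
  (∃ x ∈ l, x ≠ 0 ∧ (-x) ∈ l) ∨ 2 ≤ l.count 0

theorem eqzProp_cons (x : Int) (xs : List Int) :
    EqzProp (x :: xs) ↔ (-x) ∈ xs ∨ EqzProp xs := by
  unfold EqzProp
  constructor
  · rintro (⟨y, hy, hy0, hny⟩ | hc)
    · rcases List.mem_cons.mp hy with rfl | hyxs
      · rcases List.mem_cons.mp hny with h | h
        · exact absurd (by omega : y = 0) hy0
        · exact Or.inl (by simpa using h)
      · rcases List.mem_cons.mp hny with h | h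
        · have hx : -x = y := by omega
          exact Or.inl (hx ▸ hyxs)
        · exact Or.inr (Or.inl ⟨y, hyxs, hy0, h⟩)
    · by_cases hx : x = 0
      · subst hx
        simp only [List.count_cons_self] at hc
        have : 1 ≤ xs.count 0 := by omega
        exact Or.inl (by simpa using List.count_pos_iff.mp this)
      · right; right
        simpa [List.count_cons, hx] using hc
  · rintro (h | (⟨y, hy, hy0, hny⟩ | hc))
    · by_cases hx : x = 0
      · subst hx
        right
        have : 1 ≤ xs.count 0 := List.count_pos_iff.mpr (by simpa using h)
        simp only [List.count_cons_self]; omega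
      · left
        exact ⟨-x, List.mem_cons_of_mem _ h, by simpa using hx, by simp⟩
    · exact Or.inl ⟨y, List.mem_cons_of_mem _ hy, hy0, List.mem_cons_of_mem _ hny⟩
    · right
      simp only [List.count_cons]
      omega

theorem eqzLoop_iff (l : List Int) : ∀ (s : PySem.Set Int),
    eqzLoop s l = true ↔ (∃ b ∈ l, (-b) ∈ s) ∨ EqzProp l := by
  induction l with
  | nil => intro s; simp [eqzLoop, EqzProp]
  | cons x xs ih =>
    intro s
    simp only [eqzLoop]
    split_ifs with h
    · simp only [true_iff]
      exact Or.inl ⟨x, List.mem_cons_self, (PySem.Set.contains_iff _ _).mp h⟩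
    · rw [ih, eqzProp_cons]
      have hns : (-x) ∉ s := fun hm => h ((PySem.Set.contains_iff _ _).mpr hm)
      constructor
      · rintro (⟨b, hb, hbs⟩ | hp)
        · rcases (PySem.Set.mem_add _ _ _).mp hbs with hbs | hbx
          · exact Or.inl ⟨b, List.mem_cons_of_mem _ hb, hbs⟩
          · right; left
            have : b = -x := by omega
            subst this; simpa using hb
        · exact Or.inr (Or.inr hp)
      · rintro (⟨b, hb, hbs⟩ | hnx | hp)
        · rcases List.mem_cons.mp hb with rfl | hbxs
          · exact absurd hbs hns
          · exact Or.inl ⟨b, hbxs, (PySem.Set.mem_add _ _ _).mpr (Or.inl hbs)⟩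
        · exact Or.inl ⟨-x, hnx, (PySem.Set.mem_add _ _ _).mpr (Or.inr (by ring))⟩
        · exact Or.inr hp

theorem equalsZero_iff (lis : List Int) : equalsZero lis = true ↔ EqzProp lis := by
  unfold equalsZero
  rw [eqzLoop_iff]
  simp [PySem.Set.empty]

theorem equalsZero_alt_iff (lis : List Int) : equalsZero_alt lis = true ↔ EqzProp lis := by
  unfold equalsZero_alt EqzProp
  simp only []
  split_ifs with h
  · simp only [true_iff]
    left
    rw [List.any_eq_true] at h
    obtain ⟨x, hx, hp⟩ := h
    rw [Bool.and_eq_true, bne_iff_ne, PySem.Set.contains_iff _ _] at hp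
    exact ⟨x, (PySem.Set.mem_ofList _ _).mp hx, hp.1, (PySem.Set.mem_ofList _ _).mp hp.2⟩
  · rw [List.any_eq_true] at h
    push_neg at h
    rw [decide_eq_true_iff, PySem.List.count_eq]
    constructor
    · intro hc; exact Or.inr hc
    · rintro (⟨x, hx, hx0, hnx⟩ | hc)
      · exact absurd (by
          rw [Bool.and_eq_true, bne_iff_ne, PySem.Set.contains_iff _ _]
          exact ⟨hx0, (PySem.Set.mem_ofList _ _).mpr hnx⟩)
          (h x ((PySem.Set.mem_ofList _ _).mpr hx))
      · exact hc

-- ===== VERDICT (by name: the statement is the Claim_ definition above) =====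
theorem equalsZero_spec : Claim_equal_equalsZero := by
  intro lis _
  unfold Spec_equalsZero
  have h1 := equalsZero_iff lis
  have h2 := equalsZero_alt_iff lis
  by_cases hp : EqzProp lis
  · rw [h1.mpr hp, (h2.mpr hp)]
  · have a1 : equalsZero lis = false := by
      cases hA : equalsZero lis
      · rfl
      · exact absurd (h1.mp hA) hp
    have a2 : equalsZero_alt lis = false := by
      cases hB : equalsZero_alt lis
      · rfl
      · exact absurd (h2.mp hB) hp
    rw [a1, a2]
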